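-- pv_equiv track=rewrite | github.com/IshaSahasrabuddhe/UpdatedAIConversationalfeedback | backend/app/services/chat_service.py | _resolve_sentiment_from_memory
-- ===== SOURCE A (Python) =====
-- def _resolve_sentiment_from_memory(memory: dict) -> str:
--     sentiments = [sentiment for sentiment in memory.get("sentiments", []) if sentiment]
--     if not sentiments:
--         return "mixed"
--     unique = set(sentiments)
--     if len(unique) > 1:
--         return "mixed"
--     return sentiments[-1]
-- ===== SOURCE B (Python) =====
-- def _resolve_sentiment_from_memory(memory: dict) -> str:
--     found = None
--     for sentiment in memory.get("sentiments", []):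
--         if not sentiment:
--             continue
--         if found is None:
--             found = sentiment
--         elif sentiment != found:
--             return "mixed"
--     return "mixed" if found is None else found
-- ===== Notes on version B (the rewrite author's own statement) =====
-- stated objective: alternative
-- what changed: B is a single pass keeping one scalar 'found' with an early 'mixed' return on the first differing non-falsy sentiment, instead of materializing a filtered list plus a set and comparing cardinality.
import Mathlib
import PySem

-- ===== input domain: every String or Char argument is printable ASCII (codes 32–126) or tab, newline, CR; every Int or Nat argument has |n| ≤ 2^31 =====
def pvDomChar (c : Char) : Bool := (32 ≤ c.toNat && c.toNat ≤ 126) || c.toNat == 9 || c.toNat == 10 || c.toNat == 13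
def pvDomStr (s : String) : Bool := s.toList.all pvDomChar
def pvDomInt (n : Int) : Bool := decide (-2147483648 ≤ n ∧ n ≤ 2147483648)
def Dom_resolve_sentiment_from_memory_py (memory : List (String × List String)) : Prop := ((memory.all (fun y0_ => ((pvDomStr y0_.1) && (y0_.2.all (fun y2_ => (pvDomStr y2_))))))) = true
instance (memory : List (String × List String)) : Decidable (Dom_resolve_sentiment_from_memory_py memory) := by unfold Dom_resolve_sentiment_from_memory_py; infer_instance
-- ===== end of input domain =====

-- B replaces A's filtered-list + set with a single-pass loop over one scalar 'found'
-- and an early 'mixed' exit; alternative decomposition, same cost.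

-- ===== PORT A =====
def resolve_sentiment_from_memory_py (memory : List (String × List String)) : String :=
  let sentiments := ((PySem.Dict.mk memory).getD "sentiments" []).filter (fun s => s != "")
  if sentiments = [] then "mixed"
  else
    let unique : PySem.Set String := PySem.Set.ofList sentiments
    if 1 < unique.length then "mixed"
    else (PySem.List.pyGet? sentiments (-1)).getD "mixed"

-- ===== PORT B =====
-- the for-loop of Source B with its early return, as structural recursion on the list
def pvAltLoop (found : Option String) : List String → String
  | [] => match found with | none => "mixed" | some f => f
  | s :: rest =>
    if s == "" then pvAltLoop found rest
    else match found with
      | none => pvAltLoop (some s) rest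
      | some f => if s != f then "mixed" else pvAltLoop (some f) rest

def resolve_sentiment_from_memory_py_alt (memory : List (String × List String)) : String :=
  pvAltLoop none ((PySem.Dict.mk memory).getD "sentiments" [])

-- ===== PRECONDITION & SPEC =====
def Spec_resolve_sentiment_from_memory_py (memory : List (String × List String)) (out : String) : Prop := out = resolve_sentiment_from_memory_py_alt memory
instance (memory : List (String × List String)) (out : String) : Decidable (Spec_resolve_sentiment_from_memory_py memory out) := by unfold Spec_resolve_sentiment_from_memory_py; infer_instance

-- ===== CLAIM (what is proved, stated in full; the proofs are below) =====
def Claim_equal_resolve_sentiment_from_memory_py : Prop := ∀ (memory : List (String × List String)), Dom_resolve_sentiment_from_memory_py memory → Spec_resolve_sentiment_from_memory_py memory (resolve_sentiment_from_memory_py memory)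

-- ===== LEMMAS AND PROOFS =====

-- the loop with 'found' set: returns found iff every remaining non-empty sentiment equals it
theorem pvAltLoop_some (xs : List String) (f : String) :
    pvAltLoop (some f) xs =
      if (xs.filter (fun s => s != "")).all (fun s => s == f) then f else "mixed" := by
  induction xs with
  | nil => simp [pvAltLoop]
  | cons x rest ih =>
    by_cases hx : x = ""
    · simp [pvAltLoop, hx, ih]
    · by_cases hf : x = f
      · simp [pvAltLoop, hf, ih]
      · simp [pvAltLoop, hx, hf]

theorem pvSet_ofList_all_eq (x : String) (fr : List String)
    (h : fr.all (fun s => s == x) = true) : PySem.Set.ofList (x :: fr) = [x] := by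
  have : ∀ fr : List String, fr.all (fun s => s == x) = true →
      fr.foldl PySem.Set.add [x] = [x] := by
    intro fr
    induction fr with
    | nil => intro _; rfl
    | cons y t ih =>
      intro h
      simp only [List.all_cons, Bool.and_eq_true, beq_iff_eq] at h
      obtain ⟨hy, ht⟩ := h
      subst hy
      simpa [PySem.Set.add, PySem.Set.contains] using ih (by simpa using ht)
  simpa [PySem.Set.ofList_eq_foldl] using this fr h

theorem pvLength_lt_of_two_mem {s : List String} {x y : String}
    (hx : x ∈ s) (hy : y ∈ s) (hne : x ≠ y) : 1 < s.length := by
  cases s with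
  | nil => simp at hx
  | cons a t =>
    cases t with
    | nil => simp_all
    | cons b u => simp [List.length]

theorem pvGetLast_all_eq (x : String) (fr : List String)
    (h : fr.all (fun s => s == x) = true) : (x :: fr).getLast? = some x := by
  induction fr generalizing x with
  | nil => rfl
  | cons y t ih =>
    simp only [List.all_cons, Bool.and_eq_true, beq_iff_eq] at h
    obtain ⟨hy, ht⟩ := h
    subst hy
    rw [List.getLast?_cons_cons]
    exact ih _ (by simpa using ht)

theorem pvAltLoop_none (xs : List String) :
    pvAltLoop none xs =
      (let fs := xs.filter (fun s => s != "")
       if fs = [] then "mixed"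
       else if 1 < (PySem.Set.ofList fs).length then "mixed"
       else (PySem.List.pyGet? fs (-1)).getD "mixed") := by
  induction xs with
  | nil => rfl
  | cons x rest ih =>
    by_cases hx : x = ""
    · simpa [pvAltLoop, hx] using ih
    · simp only [pvAltLoop, List.filter_cons, beq_iff_eq, hx, bne_iff_ne, ne_eq,
        not_false_eq_true, if_pos]
      rw [pvAltLoop_some]
      by_cases hall : (rest.filter (fun s => s != "")).all (fun s => s == x) = true
      · have hset := pvSet_ofList_all_eq x _ hall
        have hlast := pvGetLast_all_eq x _ hall
        simp [hall, hset, PySem.List.pyGet?_neg_one, hlast]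
      · obtain ⟨y, hy1, hy2, hyx⟩ : ∃ y ∈ rest, ¬ y = "" ∧ ¬ y = x := by
          simpa [List.all_eq_true] using hall
        have hy : y ∈ rest.filter (fun s => s != "") := by
          simp [List.mem_filter, hy1, hy2]
        have hxm : x ∈ PySem.Set.ofList (x :: rest.filter (fun s => s != "")) := by
          rw [PySem.Set.mem_ofList]; exact List.mem_cons_self
        have hym : y ∈ PySem.Set.ofList (x :: rest.filter (fun s => s != "")) := by
          rw [PySem.Set.mem_ofList]; exact List.mem_cons_of_mem _ hy
        have hlen := pvLength_lt_of_two_mem hym hxm hyx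
        simp [hall, hlen]

-- ===== VERDICT (by name: the statement is the Claim_ definition above) =====
theorem resolve_sentiment_from_memory_py_spec : Claim_equal_resolve_sentiment_from_memory_py := by
  intro memory _
  show resolve_sentiment_from_memory_py memory = resolve_sentiment_from_memory_py_alt memory
  unfold resolve_sentiment_from_memory_py resolve_sentiment_from_memory_py_alt
  rw [pvAltLoop_none]
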